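-- pv_equiv track=rewrite | github.com/MonishaSugirthalingam/Python_Programs | Code_studio_zero_array.py | findingzero
-- ===== SOURCE A (Python) =====
-- def zero(i,j,arr,m,n):
--     for row in range(m):
--         for col in range(n):
--             if row==i or  col==j:
--                 arr[row][col]=0
--     return arr
--
-- def findingzero(arr,m,n):
--     result=[]
--     flag=0
--     for i in range(m):
--         for j in range(n):
--             if arr[i][j]==0 and flag==0:
--                 result=result+zero(i,j,arr,m,n)
--                 flag=1
--     return result
-- ===== SOURCE B (Python) =====
-- # B: short-circuiting scan for the first zero; on a hit, blank its row and its
-- # column with two linear index sweeps (O(m+n) writes instead of a conditional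
-- # full-matrix sweep) and return a shallow copy; no zero -> [].
-- # Like A, B mutates arr in place when a zero is found.
-- def findingzero(arr, m, n):
--     for i in range(m):
--         for j in range(n):
--             if arr[i][j] == 0:
--                 for col in range(n):
--                     arr[i][col] = 0
--                 for row in range(m):
--                     arr[row][j] = 0
--                 return arr[:]
--     return []
-- ===== Notes on version B (the rewrite author's own statement) =====
-- stated objective: alternative
-- what changed: A sweeps all m*n cells with a flag and, on the first zero, runs a second full m*n membership-conditioned pass writing zeros; B short-circuits the scan at the first zero and blanks its row and column with two direct linear index sweeps (O(m+n) writes).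
import Mathlib
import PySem

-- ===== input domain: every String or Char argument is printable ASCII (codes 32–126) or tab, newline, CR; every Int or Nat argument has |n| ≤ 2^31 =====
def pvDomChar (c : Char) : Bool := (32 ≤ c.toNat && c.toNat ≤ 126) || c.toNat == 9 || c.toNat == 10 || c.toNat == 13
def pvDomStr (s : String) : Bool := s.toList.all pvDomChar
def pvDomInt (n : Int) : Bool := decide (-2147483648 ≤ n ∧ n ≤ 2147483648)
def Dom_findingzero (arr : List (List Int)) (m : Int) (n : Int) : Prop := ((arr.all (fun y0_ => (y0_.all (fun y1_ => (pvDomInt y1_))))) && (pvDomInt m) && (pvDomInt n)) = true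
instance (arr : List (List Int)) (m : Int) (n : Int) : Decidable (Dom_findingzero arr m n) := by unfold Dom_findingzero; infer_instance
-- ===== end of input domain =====

-- B replaces A's flag-guarded full sweep plus O(m*n) conditional zeroing pass by a
-- short-circuiting first-zero scan followed by two linear index sweeps over the hit's
-- row and column; both programs mutate arr in place, equal return values proved here.

-- ===== PORT A =====
-- arr[i][j] read (IndexError = none)
def pvReadA (a : List (List Int)) (i j : Int) : Option Int :=
  (PySem.List.pyGet? a i).bind (fun r => PySem.List.pyGet? r j)

-- helper zero(i,j,arr,m,n): nested for-loops mutating arr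
def pvZero (i j : Int) (arr : List (List Int)) (m n : Int) : List (List Int) :=
  (PySem.List.pyRange 0 m 1).foldl (fun a row =>
    (PySem.List.pyRange 0 n 1).foldl (fun a col =>
      if row = i ∨ col = j then a.modify row.toNat (fun rw => rw.set col.toNat 0) else a) a) arr

-- state (result, flag, arr) threaded through the double loop
def findingzero (arr : List (List Int)) (m : Int) (n : Int) : List (List Int) :=
  ((PySem.List.pyRange 0 m 1).foldl (fun s i =>
    (PySem.List.pyRange 0 n 1).foldl (fun s j =>
      if pvReadA s.2.2 i j = some 0 ∧ s.2.1 = 0 then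
        (s.1 ++ pvZero i j s.2.2 m n, 1, pvZero i j s.2.2 m n)
      else s) s)
    (([] : List (List Int)), (0 : Int), arr)).1

-- ===== PORT B =====
-- inner loop 'for j in cols: if arr[i][j]==0: return j' (early return = recursion stop)
def pvScanRow (arr : List (List Int)) (i : Int) : List Int → Option Int
  | [] => none
  | j :: js => if pvReadA arr i j = some 0 then some j else pvScanRow arr i js

-- outer loop 'for i in rows: … return (i,j)'
def pvScan (arr : List (List Int)) (n : Int) : List Int → Option (Int × Int)
  | [] => none
  | i :: is =>
      match pvScanRow arr i (PySem.List.pyRange 0 n 1) with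
      | some j => some (i, j)
      | none => pvScan arr n is

def findingzero_alt (arr : List (List Int)) (m : Int) (n : Int) : List (List Int) :=
  match pvScan arr n (PySem.List.pyRange 0 m 1) with
  | none => []
  | some (r, c) =>
      -- for col in range(n): arr[r][col] = 0
      let a1 := (PySem.List.pyRange 0 n 1).foldl
        (fun a col => a.modify r.toNat (fun rw => rw.set col.toNat 0)) arr
      -- for row in range(m): arr[row][c] = 0
      (PySem.List.pyRange 0 m 1).foldl
        (fun a row => a.modify row.toNat (fun rw => rw.set c.toNat 0)) a1

-- ===== PRECONDITION & SPEC =====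
-- Pre: exactly the inputs on which A returns (A raises IndexError iff some read
-- arr[i][j], i<m, j<n, is out of range; with m ≤ 0 or n ≤ 0 nothing is read).
def Pre_findingzero (arr : List (List Int)) (m : Int) (n : Int) : Prop :=
  m ≤ 0 ∨ n ≤ 0 ∨ (m ≤ (arr.length : Int) ∧ ∀ row ∈ arr.take m.toNat, n ≤ (row.length : Int))
instance (arr : List (List Int)) (m : Int) (n : Int) : Decidable (Pre_findingzero arr m n) := by
  unfold Pre_findingzero; infer_instance
def pvWitness_findingzero : List (List Int) × Int × Int := ([[1, 0], [3, 4]], 2, 2)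

def Spec_findingzero (arr : List (List Int)) (m : Int) (n : Int) (out : List (List Int)) : Prop := out = findingzero_alt arr m n
instance (arr : List (List Int)) (m : Int) (n : Int) (out : List (List Int)) : Decidable (Spec_findingzero arr m n out) := by unfold Spec_findingzero; infer_instance

-- ===== CLAIM (what is proved, stated in full; the proofs are below) =====
def Claim_equal_findingzero : Prop := ∀ (arr : List (List Int)) (m : Int) (n : Int), Dom_findingzero arr m n → Pre_findingzero arr m n → Spec_findingzero arr m n (findingzero arr m n)

-- ===== LEMMAS AND PROOFS =====

-- the body of A's double loop, as a step over flattened (i,j) pairs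
def pvStep (m n : Int) (s : List (List Int) × Int × List (List Int)) (p : Int × Int) :
    List (List Int) × Int × List (List Int) :=
  if pvReadA s.2.2 p.1 p.2 = some 0 ∧ s.2.1 = 0 then
    (s.1 ++ pvZero p.1 p.2 s.2.2 m n, 1, pvZero p.1 p.2 s.2.2 m n)
  else s

theorem pv_unnest (arr : List (List Int)) (m n : Int) :
    findingzero arr m n =
      (((PySem.List.pyRange 0 m 1).flatMap (fun i =>
          (PySem.List.pyRange 0 n 1).map (fun j => (i, j)))).foldl (pvStep m n)
        (([] : List (List Int)), (0 : Int), arr)).1 := by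
  rw [List.foldl_flatMap]
  simp only [List.foldl_map, pvStep, findingzero]

theorem pv_flag1 (m n : Int) (ps : List (Int × Int)) (res : List (List Int))
    (a : List (List Int)) : ps.foldl (pvStep m n) (res, 1, a) = (res, 1, a) := by
  induction ps with
  | nil => rfl
  | cons p ps ih => simpa [pvStep] using ih

theorem pv_machine (m n : Int) (ps : List (Int × Int)) (arr : List (List Int)) :
    ps.foldl (pvStep m n) (([] : List (List Int)), (0 : Int), arr) =
      match ps.find? (fun p => pvReadA arr p.1 p.2 == some 0) with
      | none => (([] : List (List Int)), (0 : Int), arr)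
      | some p => (pvZero p.1 p.2 arr m n, 1, pvZero p.1 p.2 arr m n) := by
  induction ps with
  | nil => rfl
  | cons p ps ih =>
    by_cases h : pvReadA arr p.1 p.2 = some 0
    · simp [List.foldl_cons, List.find?, h, pvStep, pv_flag1]
    · simp only [List.foldl_cons, pvStep, h, false_and, if_false]
      rw [ih]
      have hb : (pvReadA arr p.1 p.2 == some 0) = false := by simp [h]
      simp [List.find?, hb]

-- B's nested early-return scan = find? over the flattened row-major pairs
theorem pv_scanRow_eq (arr : List (List Int)) (i : Int) (cols : List Int) :
    pvScanRow arr i cols = cols.find? (fun j => pvReadA arr i j == some 0) := by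
  induction cols with
  | nil => rfl
  | cons j js ih =>
    by_cases h : pvReadA arr i j = some 0
    · simp [pvScanRow, List.find?, h]
    · have hb : (pvReadA arr i j == some 0) = false := by simp [h]
      simp [pvScanRow, List.find?, h, hb, ih]

theorem pv_scan_eq (arr : List (List Int)) (n : Int) (rows : List Int) :
    pvScan arr n rows =
      (rows.flatMap (fun i => (PySem.List.pyRange 0 n 1).map (fun j => (i, j)))).find?
        (fun p => pvReadA arr p.1 p.2 == some 0) := by
  induction rows with
  | nil => rfl
  | cons i is ih =>
    rw [List.flatMap_cons, List.find?_append]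
    rw [List.find?_map]
    simp only [pvScan, pv_scanRow_eq arr i]
    cases h : (PySem.List.pyRange 0 n 1).find? (fun j => pvReadA arr i j == some 0) with
    | none =>
      have : (PySem.List.pyRange 0 n 1).find?
          ((fun p : Int × Int => pvReadA arr p.1 p.2 == some 0) ∘ fun j => (i, j)) = none := by
        simpa [Function.comp] using h
      simp [this, ih]
    | some j =>
      have : (PySem.List.pyRange 0 n 1).find?
          ((fun p : Int × Int => pvReadA arr p.1 p.2 == some 0) ∘ fun j => (i, j)) = some j := by
        simpa [Function.comp] using h
      simp [this]

-- all inner modifies target the same row: pull the modify out of the fold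
theorem pv_modify_fold (cols : List Int) (row r c : Int) (a : List (List Int)) :
    cols.foldl (fun a col =>
        if row = r ∨ col = c then a.modify row.toNat (fun rw => rw.set col.toNat 0) else a) a
    = a.modify row.toNat (fun rw =>
        cols.foldl (fun rw col => if row = r ∨ col = c then rw.set col.toNat 0 else rw) rw) := by
  induction cols generalizing a with
  | nil => exact (List.modify_id _ _).symm
  | cons col cols ih =>
    by_cases h : row = r ∨ col = c
    · simp only [List.foldl_cons, if_pos h, ih]
      rw [List.modify_modify_eq]
      rfl
    · simp only [List.foldl_cons, if_neg h, ih]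

-- the effect of a row sweep over range N
theorem pv_row_fold (N : Nat) (row r c : Int) (rw : List Int) :
    (List.range N).foldl (fun (rw : List Int) (k : Nat) =>
        if row = r ∨ (k : Int) = c then rw.set k 0 else rw) rw
    = rw.mapIdx (fun j v => if j < N ∧ (row = r ∨ (j : Int) = c) then 0 else v) := by
  induction N with
  | zero =>
    apply List.ext_getElem?
    intro t
    simp [List.getElem?_mapIdx]
  | succ N ih =>
    rw [List.range_succ, List.foldl_append, ih]
    by_cases h : row = r ∨ (N : Int) = c
    · simp only [List.foldl_cons, List.foldl_nil, if_pos h]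
      apply List.ext_getElem?
      intro t
      simp only [List.getElem?_set, List.getElem?_mapIdx, List.length_mapIdx]
      by_cases ht : N = t
      · subst ht
        cases hv : rw[N]? with
        | none =>
          have : ¬ N < rw.length := by
            intro hlt; simp [List.getElem?_eq_getElem hlt] at hv
          simp [this]
        | some v =>
          have : N < rw.length := by
            by_contra hlt
            rw [List.getElem?_eq_none_iff.mpr (by omega)] at hv
            simp at hv
          simp [this, h]
      · simp only [if_neg ht]
        cases rw[t]? with
        | none => simp
        | some v =>
          simp only [Option.map_some, Option.some.injEq]
          have : (t < N ∧ (row = r ∨ (t : Int) = c)) ↔ (t < N + 1 ∧ (row = r ∨ (t : Int) = c)) := by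
            constructor
            · rintro ⟨h1, h2⟩; exact ⟨by omega, h2⟩
            · rintro ⟨h1, h2⟩; exact ⟨by omega, h2⟩
          split_ifs with h1 h2 h2 <;> first | rfl | (exfalso; tauto)
    · simp only [List.foldl_cons, List.foldl_nil, if_neg h]
      apply List.ext_getElem?
      intro t
      simp only [List.getElem?_mapIdx]
      cases rw[t]? with
      | none => rfl
      | some v =>
        simp only [Option.map_some, Option.some.injEq]
        by_cases ht : t = N
        · subst ht; simp [h]
        · have : (t < N ∧ (row = r ∨ (t : Int) = c)) ↔ (t < N + 1 ∧ (row = r ∨ (t : Int) = c)) := by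
            constructor
            · rintro ⟨h1, h2⟩; exact ⟨by omega, h2⟩
            · rintro ⟨h1, h2⟩; exact ⟨by omega, h2⟩
          split_ifs with h1 h2 h2 <;> first | rfl | (exfalso; tauto)

-- the matrix-level effect of the outer sweep over range M
theorem pv_mat_fold (M : Nat) (n r c : Int) (a : List (List Int)) :
    (List.range M).foldl (fun (a : List (List Int)) (k : Nat) =>
        a.modify k (fun rw => rw.mapIdx (fun j v =>
          if j < n.toNat ∧ ((k : Int) = r ∨ (j : Int) = c) then 0 else v))) a
    = a.mapIdx (fun i row => row.mapIdx (fun j v =>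
        if i < M ∧ (j < n.toNat ∧ ((i : Int) = r ∨ (j : Int) = c)) then 0 else v)) := by
  induction M with
  | zero =>
    apply List.ext_getElem?
    intro t
    simp only [List.range_zero, List.foldl_nil, List.getElem?_mapIdx]
    cases a[t]? with
    | none => rfl
    | some row =>
      simp only [Option.map_some, Option.some.injEq]
      apply List.ext_getElem?
      intro u
      simp only [List.getElem?_mapIdx]
      cases row[u]? <;> simp
  | succ M ih =>
    rw [List.range_succ, List.foldl_append, ih]
    simp only [List.foldl_cons, List.foldl_nil]
    apply List.ext_getElem?
    intro t
    cases ha : a[t]? with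
    | none => simp [List.getElem?_modify, List.getElem?_mapIdx, ha]
    | some row =>
      simp only [List.getElem?_modify, List.getElem?_mapIdx, ha, Option.map_eq_map,
        Option.map_some, Option.some.injEq]
      by_cases ht : M = t
      · subst ht
        simp only [if_true, List.mapIdx_mapIdx]
        apply List.ext_getElem?
        intro u
        simp only [List.getElem?_mapIdx]
        cases row[u]? with
        | none => rfl
        | some v =>
          simp only [Option.map_some, Option.some.injEq, Function.comp]
          by_cases hc : u < n.toNat ∧ ((M : Int) = r ∨ (u : Int) = c)
          · simp [hc]
          · have h2 : ¬ (M < M ∧ (u < n.toNat ∧ ((M : Int) = r ∨ (u : Int) = c))) := by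
              rintro ⟨h1, _⟩; omega
            have h3 : ¬ (M < M + 1 ∧ (u < n.toNat ∧ ((M : Int) = r ∨ (u : Int) = c))) := by
              rintro ⟨_, h⟩; exact hc h
            simp
      · simp only [if_neg ht]
        apply List.ext_getElem?
        intro u
        simp only [List.getElem?_mapIdx]
        cases row[u]? with
        | none => rfl
        | some v =>
          simp only [Option.map_some, Option.some.injEq]
          have hiff : (t < M ∧ (u < n.toNat ∧ ((t : Int) = r ∨ (u : Int) = c))) ↔
              (t < M + 1 ∧ (u < n.toNat ∧ ((t : Int) = r ∨ (u : Int) = c))) := by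
            constructor
            · rintro ⟨h1, h2⟩; exact ⟨by omega, h2⟩
            · rintro ⟨h1, h2⟩; refine ⟨?_, h2⟩
              rcases Nat.lt_succ_iff_lt_or_eq.mp h1 with h | h
              · exact h
              · exact absurd h.symm ht
          split_ifs with h1 h2 h2 <;> first | rfl | (exfalso; tauto)

-- A's helper zero() as a closed-form map over indices
theorem pv_zero_eq (r c m n : Int) (a : List (List Int)) :
    pvZero r c a m n
    = a.mapIdx (fun i row => row.mapIdx (fun j v =>
        if (i : Int) < m ∧ (j : Int) < n ∧ ((i : Int) = r ∨ (j : Int) = c) then 0 else v)) := by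
  unfold pvZero
  have hr : ∀ (b : List (List Int)) (row : Int),
      (PySem.List.pyRange 0 n 1).foldl (fun b col =>
        if row = r ∨ col = c then b.modify row.toNat (fun rw => rw.set col.toNat 0) else b) b
      = b.modify row.toNat (fun rw => rw.mapIdx (fun j v =>
          if j < n.toNat ∧ (row = r ∨ (j : Int) = c) then 0 else v)) := by
    intro b row
    rw [pv_modify_fold]
    congr 1
    funext rw'
    rw [PySem.List.pyRange_one]
    simp only [sub_zero, List.foldl_map, zero_add]
    exact pv_row_fold n.toNat row r c rw'
  calc (PySem.List.pyRange 0 m 1).foldl (fun b row =>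
        (PySem.List.pyRange 0 n 1).foldl (fun b col =>
          if row = r ∨ col = c then b.modify row.toNat (fun rw => rw.set col.toNat 0) else b) b) a
      = (PySem.List.pyRange 0 m 1).foldl (fun b row =>
          b.modify row.toNat (fun rw => rw.mapIdx (fun j v =>
            if j < n.toNat ∧ (row = r ∨ (j : Int) = c) then 0 else v))) a := by
        apply PySem.List.foldl_congr_mem
        intro b row _
        exact hr b row
    _ = a.mapIdx (fun i row => row.mapIdx (fun j v =>
          if i < m.toNat ∧ (j < n.toNat ∧ ((i : Int) = r ∨ (j : Int) = c)) then 0 else v)) := by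
        rw [PySem.List.pyRange_one]
        simp only [sub_zero, List.foldl_map, zero_add]
        have := pv_mat_fold m.toNat n r c a
        simp only [Int.toNat_natCast] at this ⊢
        convert this using 3
    _ = a.mapIdx (fun i row => row.mapIdx (fun j v =>
          if (i : Int) < m ∧ (j : Int) < n ∧ ((i : Int) = r ∨ (j : Int) = c) then 0 else v)) := by
        apply List.ext_getElem?
        intro t
        simp only [List.getElem?_mapIdx]
        cases a[t]? with
        | none => rfl
        | some row =>
          simp only [Option.map_some, Option.some.injEq]
          apply List.ext_getElem?
          intro u
          simp only [List.getElem?_mapIdx]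
          cases row[u]? with
          | none => rfl
          | some v =>
            simp only [Option.map_some, Option.some.injEq]
            have h1 : (t < m.toNat) ↔ ((t : Int) < m) := by omega
            have h2 : (u < n.toNat) ↔ ((u : Int) < n) := by omega
            split_ifs with ha hb hb <;> first | rfl | (exfalso; tauto)

-- row sweep over range N sets the first N entries to 0
theorem pv_set_fold_nat (N : Nat) (rw : List Int) :
    (List.range N).foldl (fun (rw : List Int) (k : Nat) => rw.set k 0) rw
    = rw.mapIdx (fun j v => if j < N then 0 else v) := by
  induction N generalizing rw with
  | zero =>
    apply List.ext_getElem?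
    intro t
    simp only [List.range_zero, List.foldl_nil, List.getElem?_mapIdx]
    cases rw[t]? with
    | none => rfl
    | some v => simp
  | succ N ih =>
    rw [List.range_succ, List.foldl_append, ih]
    simp only [List.foldl_cons, List.foldl_nil]
    apply List.ext_getElem?
    intro t
    simp only [List.getElem?_set, List.getElem?_mapIdx, List.length_mapIdx]
    by_cases ht : N = t
    · subst ht
      cases hv : rw[N]? with
      | none =>
        have : ¬ N < rw.length := by
          intro hlt; simp [List.getElem?_eq_getElem hlt] at hv
        simp [this]
      | some v =>
        have : N < rw.length := by
          by_contra hlt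
          rw [List.getElem?_eq_none_iff.mpr (by omega)] at hv
          simp at hv
        simp [this]
    · simp only [if_neg ht]
      cases rw[t]? with
      | none => simp
      | some v =>
        simp only [Option.map_some, Option.some.injEq]
        split_ifs with h1 h2 h2 <;> first | rfl | (exfalso; omega)

-- column sweep over range M sets entry cN of the first M rows to 0
theorem pv_modifyrows_fold_nat (M cN : Nat) (a : List (List Int)) :
    (List.range M).foldl (fun (a : List (List Int)) (k : Nat) =>
        a.modify k (fun rw => rw.set cN 0)) a
    = a.mapIdx (fun i row => if i < M then row.set cN 0 else row) := by
  induction M generalizing a with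
  | zero =>
    apply List.ext_getElem?
    intro t
    simp only [List.range_zero, List.foldl_nil, List.getElem?_mapIdx]
    cases a[t]? with
    | none => rfl
    | some row => simp
  | succ M ih =>
    rw [List.range_succ, List.foldl_append, ih]
    simp only [List.foldl_cons, List.foldl_nil]
    apply List.ext_getElem?
    intro t
    cases ha : a[t]? with
    | none => simp [List.getElem?_modify, List.getElem?_mapIdx, ha]
    | some row =>
      simp only [List.getElem?_modify, List.getElem?_mapIdx, ha, Option.map_eq_map,
        Option.map_some, Option.some.injEq]
      by_cases ht : M = t
      · subst ht
        have h1 : ¬ (M < M) := by omega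
        have h2 : M < M + 1 := by omega
        simp [h1, h2]
      · simp only [if_neg ht]
        split_ifs with h1 h2 h2 <;> first | rfl | (exfalso; omega)

-- B's row sweep: all modifies target row r.toNat
theorem pv_b_rowsweep (n r : Int) (a : List (List Int)) :
    (PySem.List.pyRange 0 n 1).foldl
        (fun a col => a.modify r.toNat (fun rw => rw.set col.toNat 0)) a
    = a.modify r.toNat (fun rw => rw.mapIdx (fun j v => if (j : Int) < n then 0 else v)) := by
  have pull : ∀ (cols : List Int) (b : List (List Int)),
      cols.foldl (fun b col => b.modify r.toNat (fun rw => rw.set col.toNat 0)) b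
      = b.modify r.toNat (fun rw => cols.foldl (fun rw col => rw.set col.toNat 0) rw) := by
    intro cols
    induction cols with
    | nil => intro b; exact (List.modify_id _ _).symm
    | cons col cols ih =>
      intro b
      simp only [List.foldl_cons, ih]
      rw [List.modify_modify_eq]
      rfl
  rw [pull]
  congr 1
  funext rw'
  rw [PySem.List.pyRange_one]
  simp only [sub_zero, List.foldl_map, zero_add, Int.toNat_natCast]
  rw [pv_set_fold_nat]
  apply List.ext_getElem?
  intro t
  simp only [List.getElem?_mapIdx]
  cases rw'[t]? with
  | none => rfl
  | some v =>
    simp only [Option.map_some, Option.some.injEq]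
    have : t < n.toNat ↔ (t : Int) < n := by omega
    split_ifs with h1 h2 h2 <;> first | rfl | (exfalso; omega)

-- B's column sweep: one modify per row index below m
theorem pv_b_colsweep (m c : Int) (a : List (List Int)) :
    (PySem.List.pyRange 0 m 1).foldl
        (fun a row => a.modify row.toNat (fun rw => rw.set c.toNat 0)) a
    = a.mapIdx (fun i row => if (i : Int) < m then row.set c.toNat 0 else row) := by
  rw [PySem.List.pyRange_one]
  simp only [sub_zero, List.foldl_map, zero_add, Int.toNat_natCast]
  rw [pv_modifyrows_fold_nat]
  apply List.ext_getElem?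
  intro t
  simp only [List.getElem?_mapIdx]
  cases a[t]? with
  | none => rfl
  | some row =>
    simp only [Option.map_some, Option.some.injEq]
    have : t < m.toNat ↔ (t : Int) < m := by omega
    split_ifs with h1 h2 h2 <;> first | rfl | (exfalso; omega)

-- B's two sweeps equal A's zero() for an in-range hit (0 ≤ r < m, 0 ≤ c < n)
theorem pv_sweeps_eq (r c m n : Int) (hr0 : 0 ≤ r) (hrm : r < m) (hc0 : 0 ≤ c) (hcn : c < n)
    (arr : List (List Int)) :
    (PySem.List.pyRange 0 m 1).foldl
        (fun a row => a.modify row.toNat (fun rw => rw.set c.toNat 0))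
        ((PySem.List.pyRange 0 n 1).foldl
          (fun a col => a.modify r.toNat (fun rw => rw.set col.toNat 0)) arr)
    = pvZero r c arr m n := by
  rw [pv_b_rowsweep, pv_b_colsweep, pv_zero_eq]
  apply List.ext_getElem?
  intro t
  simp only [List.getElem?_mapIdx, List.getElem?_modify, Option.map_eq_map]
  cases ha : arr[t]? with
  | none => simp
  | some row =>
    simp only [Option.map_some, Option.some.injEq]
    by_cases htr : r.toNat = t
    · -- the hit's row: every column index < n becomes 0 (set at c is already 0 there)
      have htri : (t : Int) = r := by omega
      have htm : (t : Int) < m := by omega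
      simp only [if_pos htr, htm, if_pos]
      apply List.ext_getElem?
      intro u
      simp only [List.getElem?_set, List.getElem?_mapIdx, List.length_mapIdx]
      by_cases hu : c.toNat = u
      · have hui : (u : Int) = c := by omega
        have hun : (u : Int) < n := by omega
        by_cases hl : u < row.length
        · have : row[u]? = some row[u] := List.getElem?_eq_getElem hl
          simp [hu, hl, this, htri, hun, htm]
        · have : row[u]? = none := List.getElem?_eq_none_iff.mpr (by omega)
          simp [hu, hl, this]
      · simp only [if_neg hu]
        cases row[u]? with
        | none => rfl
        | some v =>
          simp only [Option.map_some, Option.some.injEq]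
          by_cases hun : (u : Int) < n
          · simp [hun, htm, htri]
          · have : ¬ ((t : Int) < m ∧ (u : Int) < n ∧ ((t : Int) = r ∨ (u : Int) = c)) := by
              rintro ⟨_, h2, _⟩; exact hun h2
            simp [hun, this]
    · -- other rows: only column c (if < m rows) becomes 0
      simp only [if_neg htr]
      by_cases htm : (t : Int) < m
      · simp only [if_pos htm]
        apply List.ext_getElem?
        intro u
        simp only [List.getElem?_set, List.getElem?_mapIdx]
        by_cases hu : c.toNat = u
        · have hui : (u : Int) = c := by omega
          have hun : (u : Int) < n := by omega
          by_cases hl : u < row.length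
          · have : row[u]? = some row[u] := List.getElem?_eq_getElem hl
            simp only [hu, hl, this, if_pos, Option.map_some, Option.some.injEq]
            have : (t : Int) < m ∧ (u : Int) < n ∧ ((t : Int) = r ∨ (u : Int) = c) :=
              ⟨htm, hun, Or.inr hui⟩
            simp [this, hl]
          · have : row[u]? = none := List.getElem?_eq_none_iff.mpr (by omega)
            simp [hu, hl, this]
        · simp only [if_neg hu]
          cases row[u]? with
          | none => rfl
          | some v =>
            simp only [Option.map_some, Option.some.injEq]
            have hnr : (t : Int) ≠ r := by omega
            have hnc : (u : Int) ≠ c := by omega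
            have : ¬ ((t : Int) < m ∧ (u : Int) < n ∧ ((t : Int) = r ∨ (u : Int) = c)) := by
              rintro ⟨_, _, h3 | h3⟩
              · exact hnr h3
              · exact hnc h3
            simp [this]
      · simp only [if_neg htm]
        apply List.ext_getElem?
        intro u
        simp only [List.getElem?_mapIdx]
        cases row[u]? with
        | none => rfl
        | some v =>
          have : ¬ ((t : Int) < m ∧ (u : Int) < n ∧ ((t : Int) = r ∨ (u : Int) = c)) := by
            rintro ⟨h1, _, _⟩; exact htm h1
          simp [this]

-- a hit returned by the scan lies inside the m × n window
theorem pv_scan_bounds (arr : List (List Int)) (m n r c : Int)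
    (h : pvScan arr n (PySem.List.pyRange 0 m 1) = some (r, c)) :
    0 ≤ r ∧ r < m ∧ 0 ≤ c ∧ c < n := by
  rw [pv_scan_eq] at h
  have hmem := List.mem_of_find?_eq_some h
  rw [List.mem_flatMap] at hmem
  obtain ⟨i, hi, hij⟩ := hmem
  rw [List.mem_map] at hij
  obtain ⟨j, hj, hpair⟩ := hij
  injection hpair with h1 h2
  subst h1; subst h2
  have hb1 := (PySem.List.mem_pyRange_one).mp hi
  have hb2 := (PySem.List.mem_pyRange_one).mp hj
  exact ⟨hb1.1, hb1.2, hb2.1, hb2.2⟩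

theorem pv_main (arr : List (List Int)) (m n : Int) :
    findingzero arr m n = findingzero_alt arr m n := by
  rw [pv_unnest, pv_machine]
  unfold findingzero_alt
  rw [pv_scan_eq]
  cases hf : ((PySem.List.pyRange 0 m 1).flatMap (fun i =>
      (PySem.List.pyRange 0 n 1).map (fun j => (i, j)))).find?
      (fun p => pvReadA arr p.1 p.2 == some 0) with
  | none => rfl
  | some p =>
    obtain ⟨r, c⟩ := p
    have hscan : pvScan arr n (PySem.List.pyRange 0 m 1) = some (r, c) := by
      rw [pv_scan_eq]; exact hf
    obtain ⟨hr0, hrm, hc0, hcn⟩ := pv_scan_bounds arr m n r c hscan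
    simp only []
    exact (pv_sweeps_eq r c m n hr0 hrm hc0 hcn arr).symm

-- ===== VERDICT (by name: the statement is the Claim_ definition above) =====
theorem findingzero_spec : Claim_equal_findingzero := by
  intro arr m n _ _
  unfold Spec_findingzero
  exact pv_main arr m n
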